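-- pv_equiv track=rewrite | github.com/liuguoyou/KDFReVS-3D | video_dataloader_gru.py | padding_frames
-- ===== SOURCE A (Python) =====
-- def padding_frames(frames, needs_len):
--     if len(frames) == 1:
--         return frames * needs_len
--     else:
--         padding_num = int(needs_len / (len(frames)-1))
--     padding_frames = []
--     for i in range(padding_num + 1):
--         if i % 2 == 0:
--             padding_frames += frames
--         else:
--             padding_frames += frames[1:-1][::-1]
--     return padding_frames
-- ===== SOURCE B (Python) =====
-- def padding_frames(frames, needs_len):
--     if len(frames) == 1:
--         return frames * needs_len
--     num_pieces = int(needs_len / (len(frames) - 1)) + 1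
--     if num_pieces <= 0:
--         return []
--     block = frames + frames[1:-1][::-1]
--     result = block * (num_pieces // 2)
--     if num_pieces % 2 == 1:
--         result = result + frames
--     return result
-- ===== Notes on version B (the rewrite author's own statement) =====
-- stated objective: alternative
-- what changed: Replaces the per-iteration i%2 branching loop with a period-2 decomposition: build one ping-pong block (frames + reversed interior) once, replicate it half the piece count, and append one trailing frames when the piece count is odd.
import Mathlib
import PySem

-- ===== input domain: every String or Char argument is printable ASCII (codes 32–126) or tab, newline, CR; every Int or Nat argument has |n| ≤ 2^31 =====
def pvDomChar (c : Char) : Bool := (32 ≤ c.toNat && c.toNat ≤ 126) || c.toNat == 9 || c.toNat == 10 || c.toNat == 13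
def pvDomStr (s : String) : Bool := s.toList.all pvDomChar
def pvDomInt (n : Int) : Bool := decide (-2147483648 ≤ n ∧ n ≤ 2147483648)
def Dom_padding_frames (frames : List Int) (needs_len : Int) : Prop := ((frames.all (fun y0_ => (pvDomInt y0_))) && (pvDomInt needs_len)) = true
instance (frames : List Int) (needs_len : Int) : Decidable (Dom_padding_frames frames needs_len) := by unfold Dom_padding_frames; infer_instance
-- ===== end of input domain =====

-- B replaces the i%2 branching loop with a period-2 block built once, replicated, plus an odd-count tail.

-- ===== PORT A =====
-- 'frames * needs_len' (negative count gives []) ported by hand as flatten/replicate via toNat clamping, exact.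
def padding_frames (frames : List Int) (needs_len : Int) : List Int :=
  if frames.length = 1 then
    List.flatten (List.replicate needs_len.toNat frames)
  else
    -- int(needs_len / (len(frames)-1)) : exact as truncdiv on the |n| ≤ 2^31 domain
    let padding_num : Int := PySem.Int.truncdiv needs_len ((frames.length : Int) - 1)
    (PySem.List.pyRange 0 (padding_num + 1) 1).foldl
      (fun acc i =>
        if PySem.Int.mod i 2 = 0 then acc ++ frames
        else acc ++ (PySem.List.slice frames (some 1) (some (-1))).reverse) []

-- ===== PORT B =====
def padding_frames_alt (frames : List Int) (needs_len : Int) : List Int :=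
  if frames.length = 1 then
    List.flatten (List.replicate needs_len.toNat frames)
  else
    let num_pieces : Int := PySem.Int.truncdiv needs_len ((frames.length : Int) - 1) + 1
    if num_pieces ≤ 0 then []
    else
      let block := frames ++ (PySem.List.slice frames (some 1) (some (-1))).reverse
      let result := List.flatten (List.replicate (PySem.Int.floordiv num_pieces 2).toNat block)
      if PySem.Int.mod num_pieces 2 = 1 then result ++ frames else result

-- ===== PRECONDITION & SPEC =====
def Spec_padding_frames (frames : List Int) (needs_len : Int) (out : List Int) : Prop := out = padding_frames_alt frames needs_len
instance (frames : List Int) (needs_len : Int) (out : List Int) : Decidable (Spec_padding_frames frames needs_len out) := by unfold Spec_padding_frames; infer_instance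

-- ===== CLAIM (what is proved, stated in full; the proofs are below) =====
def Claim_equal_padding_frames : Prop := ∀ (frames : List Int) (needs_len : Int), Dom_padding_frames frames needs_len → Spec_padding_frames frames needs_len (padding_frames frames needs_len)

-- ===== LEMMAS AND PROOFS =====

-- the alternating loop over range 0..n-1 equals (n/2) copies of (A ++ B) plus an odd tail A
theorem pv_alt_mod (m : Nat) : PySem.Int.mod ((m : Nat) : Int) 2 = ((m % 2 : Nat) : Int) := by
  simp [PySem.Int.mod, Int.fmod_eq_emod]

theorem pv_alt_loop (A B : List Int) (n : Nat) :
    (PySem.List.pyRange 0 (n : Int) 1).foldl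
      (fun acc i => if PySem.Int.mod i 2 = 0 then acc ++ A else acc ++ B) []
    = List.flatten (List.replicate (n / 2) (A ++ B)) ++ (if n % 2 = 1 then A else []) := by
  induction n with
  | zero => simp [PySem.List.pyRange_one_eq_nil]
  | succ n ih =>
    rw [show ((n + 1 : Nat) : Int) = (n : Int) + 1 by push_cast; ring,
        PySem.List.pyRange_one_succ_right (by exact_mod_cast Nat.zero_le n : (0:Int) ≤ (n:Int)),
        List.foldl_append, ih, List.foldl_cons, List.foldl_nil, pv_alt_mod]
    rcases Nat.even_or_odd n with he | ho
    · have h1 : n % 2 = 0 := Nat.even_iff.mp he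
      have h2 : (n + 1) % 2 = 1 := by omega
      have h3 : (n + 1) / 2 = n / 2 := by omega
      rw [h1, h2, h3]
      simp
    · have h1 : n % 2 = 1 := Nat.odd_iff.mp ho
      have h2 : (n + 1) % 2 = 0 := by omega
      have h3 : (n + 1) / 2 = n / 2 + 1 := by omega
      rw [h1, h2, h3, List.replicate_succ']
      simp

-- ===== VERDICT (by name: the statement is the Claim_ definition above) =====
theorem padding_frames_spec : Claim_equal_padding_frames := by
  intro frames needs_len _
  unfold Spec_padding_frames padding_frames padding_frames_alt
  by_cases h1 : frames.length = 1
  · simp [h1]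
  · simp only [h1, if_false]
    set N : Int := PySem.Int.truncdiv needs_len ((frames.length : Int) - 1) + 1 with hN
    by_cases hle : N ≤ 0
    · rw [PySem.List.pyRange_one_eq_nil hle]
      simp [hle]
    · have hle' : 0 < N := by omega
      have hn : N = ((N.toNat : Nat) : Int) := by omega
      have hdiv : (PySem.Int.floordiv N 2).toNat = N.toNat / 2 := by
        simp [PySem.Int.floordiv, Int.fdiv_eq_ediv]
        omega
      have hmod : PySem.Int.mod N 2 = ((N.toNat % 2 : Nat) : Int) := by
        simp [PySem.Int.mod, Int.fmod_eq_emod]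
        omega
      rw [if_neg (by omega : ¬ N ≤ 0), hdiv, hmod, hn, pv_alt_loop]
      have hmax : max N 0 = N := by omega
      by_cases hpar : N.toNat % 2 = 1
      · simp [hpar, hmax]
      · simp [hpar, hmax, show ¬ N % 2 = 1 by omega]
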